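-- pv_equiv track=rewrite | github.com/tindalh/adub | importers/eiaImporter.py | getSeriesString
-- ===== SOURCE A (Python) =====
-- def getSeriesString(series, isSQL=False):
--     """
--         Assumes series is a list of series dicts
--         Returns a ; joined string of up to 100 series ids
--     """
--     countSeries = 0
--     stringSeriesIds = ''
--     for i in range(len(series)):
--
--         countSeries += 1
--         if(not isSQL):
--             stringSeriesIds += series[i]['series_id'] + ';'
--         else:
--             stringSeriesIds += "'" + series[i]['series_id'] + "',"
--
--         if(countSeries == 100 or i == len(series) - 1):
--             yield stringSeriesIds[:-1]
--
--             countSeries = 0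
--             stringSeriesIds = ''
-- ===== SOURCE B (Python) =====
-- def getSeriesString(series, isSQL=False):
--     """Chunk into groups of 100 and join ids directly (no counter, no trailing-char trim)."""
--     for start in range(0, len(series), 100):
--         chunk = series[start:start + 100]
--         if isSQL:
--             yield ",".join("'" + s['series_id'] + "'" for s in chunk)
--         else:
--             yield ";".join(s['series_id'] for s in chunk)
-- ===== Notes on version B (the rewrite author's own statement) =====
-- stated objective: simpler
-- what changed: Replaced the per-element counter/accumulator loop with its boundary test and trailing-character trim by iteration over 100-sized slices, each yielded as a single join.
import Mathlib
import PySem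

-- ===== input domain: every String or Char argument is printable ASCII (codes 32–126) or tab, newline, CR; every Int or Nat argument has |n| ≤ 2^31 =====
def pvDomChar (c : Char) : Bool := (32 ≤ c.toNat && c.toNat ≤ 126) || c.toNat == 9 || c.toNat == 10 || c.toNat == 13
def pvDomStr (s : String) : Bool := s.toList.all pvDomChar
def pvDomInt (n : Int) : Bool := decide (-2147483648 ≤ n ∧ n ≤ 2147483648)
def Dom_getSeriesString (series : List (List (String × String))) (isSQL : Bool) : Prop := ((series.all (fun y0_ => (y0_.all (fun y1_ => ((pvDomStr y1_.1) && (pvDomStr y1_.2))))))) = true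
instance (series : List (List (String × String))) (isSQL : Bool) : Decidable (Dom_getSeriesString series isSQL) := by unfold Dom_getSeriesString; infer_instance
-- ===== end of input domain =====

-- B chunks the list into slices of 100 and yields one join per chunk, replacing A's
-- counter, boundary test and trailing-character trim; equivalence of RETURN values only.

-- ===== PORT A =====
-- series[i]['series_id']  (first match in the association list; none = KeyError, excluded by Pre_)
def pvId (d : List (String × String)) : String :=
  ((PySem.Dict.mk d).get? "series_id").getD ""

-- the for-loop of A: state = (countSeries, stringSeriesIds); 'i == len(series)-1' is 'rest is empty'
def pvALoop (isSQL : Bool) : List (List (String × String)) → Int → String → List String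
  | [], _, _ => []
  | d :: rest, countSeries, stringSeriesIds =>
    let countSeries := countSeries + 1
    let stringSeriesIds :=
      if !isSQL then stringSeriesIds ++ pvId d ++ ";"
      else stringSeriesIds ++ "'" ++ pvId d ++ "',"
    if countSeries == 100 || rest.isEmpty then
      PySem.Str.slice stringSeriesIds none (some (-1)) :: pvALoop isSQL rest 0 ""
    else pvALoop isSQL rest countSeries stringSeriesIds

def getSeriesString (series : List (List (String × String))) (isSQL : Bool) : List String :=
  pvALoop isSQL series 0 ""

-- ===== PORT B =====
-- one yielded chunk string: the join over the chunk's ids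
def pvBChunk (isSQL : Bool) (chunk : List (List (String × String))) : String :=
  if isSQL then PySem.Str.join "," (chunk.map (fun s => "'" ++ pvId s ++ "'"))
  else PySem.Str.join ";" (chunk.map (fun s => pvId s))

-- 'for start in range(0, len(series), 100)' with chunk = series[start:start+100]
def getSeriesString_alt (series : List (List (String × String))) (isSQL : Bool) : List String :=
  if h : series = [] then []
  else pvBChunk isSQL (series.take 100) :: getSeriesString_alt (series.drop 100) isSQL
termination_by series.length
decreasing_by
  simp only [List.length_drop]
  have : series.length ≠ 0 := fun hl => h (List.eq_nil_of_length_eq_zero hl)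
  omega

-- ===== PRECONDITION & SPEC =====
-- Pre_ excludes exactly the inputs where A raises KeyError: a dict without the 'series_id' key.
def Pre_getSeriesString (series : List (List (String × String))) (isSQL : Bool) : Prop :=
  ∀ d ∈ series, (PySem.Dict.mk d).contains "series_id" = true
instance (series : List (List (String × String))) (isSQL : Bool) : Decidable (Pre_getSeriesString series isSQL) := by unfold Pre_getSeriesString; infer_instance

def pvWitness_getSeriesString : (List (List (String × String))) × Bool :=
  ([[("series_id", "ELEC.GEN")], [("series_id", "PET.X")]], false)

def Spec_getSeriesString (series : List (List (String × String))) (isSQL : Bool) (out : List String) : Prop := out = getSeriesString_alt series isSQL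
instance (series : List (List (String × String))) (isSQL : Bool) (out : List String) : Decidable (Spec_getSeriesString series isSQL out) := by unfold Spec_getSeriesString; infer_instance

-- ===== CLAIM (what is proved, stated in full; the proofs are below) =====
def Claim_equal_getSeriesString : Prop := ∀ (series : List (List (String × String))) (isSQL : Bool), Dom_getSeriesString series isSQL → Pre_getSeriesString series isSQL → Spec_getSeriesString series isSQL (getSeriesString series isSQL)

-- ===== LEMMAS AND PROOFS =====

-- the separator-terminated piece A appends per element, and its concatenation over a list
def pvTerm (isSQL : Bool) (d : List (String × String)) : String :=
  if !isSQL then pvId d ++ ";" else "'" ++ pvId d ++ "',"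

def pvCat (isSQL : Bool) (l : List (List (String × String))) : String :=
  l.foldr (fun d r => pvTerm isSQL d ++ r) ""

theorem pvCat_nil (isSQL : Bool) : pvCat isSQL [] = "" := rfl

theorem pvCat_cons (isSQL : Bool) (d : List (String × String)) (l : List (List (String × String))) :
    pvCat isSQL (d :: l) = pvTerm isSQL d ++ pvCat isSQL l := rfl

-- list-of-chars form: concat of sep-terminated pieces = join ++ [sep], for a nonempty list
theorem pvJoinChars (sep : Char) (xs : List (List Char)) (h : xs ≠ []) :
    (xs.map (· ++ [sep])).foldr (· ++ ·) [] = PySem.Chars.join [sep] xs ++ [sep] := by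
  induction xs with
  | nil => exact absurd rfl h
  | cons x rest ih =>
    cases rest with
    | nil => simp [PySem.Chars.join_singleton]
    | cons y ys =>
      rw [List.map_cons, List.foldr_cons, ih (by simp), PySem.Chars.join_cons_cons]
      simp

-- the join-side view of a term: its id piece and the separator character
def pvPiece (isSQL : Bool) (d : List (String × String)) : String :=
  if isSQL then "'" ++ pvId d ++ "'" else pvId d

def pvSep (isSQL : Bool) : Char := if isSQL then ',' else ';'

theorem pvTerm_toList (isSQL : Bool) (d : List (String × String)) :
    (pvTerm isSQL d).toList = (pvPiece isSQL d).toList ++ [pvSep isSQL] := by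
  cases isSQL <;> simp [pvTerm, pvPiece, pvSep, String.toList_append]

theorem pvCat_toList (isSQL : Bool) (chunk : List (List (String × String))) :
    (pvCat isSQL chunk).toList =
      ((chunk.map (fun d => (pvPiece isSQL d).toList)).map (· ++ [pvSep isSQL])).foldr (· ++ ·) [] := by
  induction chunk with
  | nil => rfl
  | cons d l ih =>
    simp only [pvCat_cons, List.map_cons, List.foldr_cons, String.toList_append, ih, pvTerm_toList]

-- the core bridge: A's accumulator for one full chunk, last character trimmed, is B's join
theorem pvChunk_eq (isSQL : Bool) (chunk : List (List (String × String))) (h : chunk ≠ []) :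
    PySem.Str.slice (pvCat isSQL chunk) none (some (-1)) = pvBChunk isSQL chunk := by
  apply String.toList_inj.mp
  rw [PySem.Str.slice_to_neg_one, pvCat_toList,
    pvJoinChars _ _ (by simpa using h), List.dropLast_concat]
  cases isSQL <;>
    simp [pvBChunk, PySem.Str.toList_join, pvPiece, pvSep, List.map_map, Function.comp_def,
      String.toList_append]

-- the loop invariant: with k items left in the current chunk (0 < k ≤ 100) and acc accumulated
theorem pvALoop_inner (isSQL : Bool) :
    ∀ (l : List (List (String × String))) (k : Nat) (acc : String), 0 < k → k ≤ 100 → l ≠ [] →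
      pvALoop isSQL l (100 - (k : Int)) acc =
        PySem.Str.slice (acc ++ pvCat isSQL (l.take k)) none (some (-1)) :: pvALoop isSQL (l.drop k) 0 "" := by
  intro l
  induction l with
  | nil => intro k acc _ _ h; exact absurd rfl h
  | cons d rest ih =>
    intro k acc hk0 hk100 _
    obtain ⟨m, rfl⟩ : ∃ m, k = m + 1 := ⟨k - 1, by omega⟩
    by_cases hm : m = 0
    · subst hm
      simp [pvALoop, pvCat_cons, pvCat_nil, pvTerm]
      cases isSQL <;> simp [String.append_assoc]
    · by_cases hre : rest = []
      · subst hre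
        simp [pvALoop, pvCat_cons, pvCat_nil, pvTerm, List.take_succ_cons]
        cases isSQL <;> simp [String.append_assoc]
      · have hcond : ((100 - ((m + 1 : Nat) : Int) + 1 == 100) || rest.isEmpty) = false := by
          have : rest.isEmpty = false := by simpa [List.isEmpty_iff] using hre
          simp only [this, Bool.or_false, beq_eq_false_iff_ne, ne_eq]
          omega
        simp only [pvALoop, hcond, Bool.false_eq_true, if_false]
        have hcast : (100 - ((m + 1 : Nat) : Int) + 1) = 100 - ((m : Nat) : Int) := by push_cast; ring
        rw [hcast]
        rw [ih m _ (by omega) (by omega) hre]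
        simp only [List.take_succ_cons, List.drop_succ_cons, pvCat_cons]
        congr 2
        cases isSQL <;> simp [pvTerm, String.append_assoc]

theorem pvA_eq_B (isSQL : Bool) (l : List (List (String × String))) :
    pvALoop isSQL l 0 "" = getSeriesString_alt l isSQL := by
  generalize hn : l.length = n
  induction n using Nat.strong_induction_on generalizing l with
  | _ n ih =>
    rw [getSeriesString_alt]
    by_cases h : l = []
    · subst h; simp [pvALoop]
    · have h100 : pvALoop isSQL l ((100 : Int) - ((100 : Nat) : Int)) "" =
          PySem.Str.slice ("" ++ pvCat isSQL (l.take 100)) none (some (-1)) :: pvALoop isSQL (l.drop 100) 0 "" :=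
        pvALoop_inner isSQL l 100 "" (by omega) (le_refl _) h
      have hlen : (l.drop 100).length < n := by
        subst hn
        have : l.length ≠ 0 := fun hl => h (List.eq_nil_of_length_eq_zero hl)
        simp [List.length_drop]; omega
      norm_num at h100
      rw [h100,
        pvChunk_eq isSQL (l.take 100) (by simp [h, List.take_eq_nil_iff]),
        ih _ hlen _ rfl]
      simp [h]

-- ===== VERDICT (by name: the statement is the Claim_ definition above) =====
theorem getSeriesString_spec : Claim_equal_getSeriesString := by
  intro series isSQL _ _
  unfold Spec_getSeriesString getSeriesString
  exact pvA_eq_B isSQL series
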